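-- pv_equiv track=rewrite | github.com/WSM-simon/CP-problems | USACO/Bronze/USACO 2021 February Contest Bronze/Clockwise_Fence/Clockwise_Fence.py | solve_line
-- ===== SOURCE A (Python) =====
-- def solve_line(line):
--     r = 0
--     l = 0
--
--     for i in range(len(line)-1):
--         temp = line[i:i+2]
--         if ((temp == "NE") or (temp == "ES") or (temp == "SW") or (temp =="WN")):
--             r += 1
--         elif ((temp == "EN") or (temp == "SE") or (temp == "WS") or (temp == "NW")):
--             l += 1
--
--     if r > l:
--         return 'CW'
--     else:
--         return 'CCW'
-- ===== SOURCE B (Python) =====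
-- def solve_line(line):
--     pairs = [line[i:i+2] for i in range(len(line) - 1)]
--     cw = sum(pairs.count(p) for p in ("NE", "ES", "SW", "WN"))
--     ccw = sum(pairs.count(p) for p in ("EN", "SE", "WS", "NW"))
--     return 'CW' if cw > ccw else 'CCW'
-- ===== Notes on version B (the rewrite author's own statement) =====
-- stated objective: alternative
-- what changed: Replaces A's single accumulating pass (two counters updated by an 8-way if-chain) with staged passes: build the list of adjacent two-character windows once, then count each of the four CW and four CCW patterns with list.count and compare the two sums.
import Mathlib
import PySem

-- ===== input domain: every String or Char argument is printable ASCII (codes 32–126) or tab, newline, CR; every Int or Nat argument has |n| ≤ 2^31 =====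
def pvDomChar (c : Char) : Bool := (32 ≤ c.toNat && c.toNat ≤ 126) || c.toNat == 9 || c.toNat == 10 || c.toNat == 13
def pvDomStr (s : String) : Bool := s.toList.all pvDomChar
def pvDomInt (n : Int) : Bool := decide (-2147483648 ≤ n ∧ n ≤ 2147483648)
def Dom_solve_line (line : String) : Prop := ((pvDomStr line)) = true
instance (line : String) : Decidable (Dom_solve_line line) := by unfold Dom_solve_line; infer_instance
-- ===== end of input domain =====

-- B replaces A's accumulating pass (two counters driven by an 8-way if-chain) with staged passes:
-- materialise the adjacent-window list once, then count the eight patterns with list.count and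
-- compare the two sums (objective: alternative; same O(n) cost).

-- ===== PORT A =====
def solve_line (line : String) : String :=
  let res := (PySem.List.pyRange 0 (PySem.Str.len line - 1) 1).foldl
    (fun (rl : Int × Int) i =>
      let temp := PySem.Str.slice line (some i) (some (i + 2))
      if temp = "NE" ∨ temp = "ES" ∨ temp = "SW" ∨ temp = "WN" then (rl.1 + 1, rl.2)
      else if temp = "EN" ∨ temp = "SE" ∨ temp = "WS" ∨ temp = "NW" then (rl.1, rl.2 + 1)
      else rl) (0, 0)
  if res.1 > res.2 then "CW" else "CCW"

-- ===== PORT B =====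
def solve_line_alt (line : String) : String :=
  let pairs := (PySem.List.pyRange 0 (PySem.Str.len line - 1) 1).map
    (fun i => PySem.Str.slice line (some i) (some (i + 2)))
  let cw := (["NE", "ES", "SW", "WN"].map (fun p => (PySem.List.count pairs p : Int))).sum
  let ccw := (["EN", "SE", "WS", "NW"].map (fun p => (PySem.List.count pairs p : Int))).sum
  if cw > ccw then "CW" else "CCW"

-- ===== PRECONDITION & SPEC =====
def Spec_solve_line (line : String) (out : String) : Prop := out = solve_line_alt line
instance (line : String) (out : String) : Decidable (Spec_solve_line line out) := by unfold Spec_solve_line; infer_instance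

-- ===== CLAIM (what is proved, stated in full; the proofs are below) =====
def Claim_equal_solve_line : Prop := ∀ (line : String), Dom_solve_line line → Spec_solve_line line (solve_line line)

-- ===== LEMMAS AND PROOFS =====

-- A's loop body, abstracted over the two-character window
def pvStep (rl : Int × Int) (t : String) : Int × Int :=
  if t = "NE" ∨ t = "ES" ∨ t = "SW" ∨ t = "WN" then (rl.1 + 1, rl.2)
  else if t = "EN" ∨ t = "SE" ∨ t = "WS" ∨ t = "NW" then (rl.1, rl.2 + 1)
  else rl

-- B's two staged sums over the same window list
def pvCW (ws : List String) : Int :=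
  (ws.count "NE" : Int) + ws.count "ES" + ws.count "SW" + ws.count "WN"
def pvCCW (ws : List String) : Int :=
  (ws.count "EN" : Int) + ws.count "SE" + ws.count "WS" + ws.count "NW"

-- A's fold over the windows computes exactly B's two pattern-count sums
lemma pv_fold_counts (ws : List String) : ∀ (r l : Int),
    ws.foldl pvStep (r, l) = (r + pvCW ws, l + pvCCW ws) := by
  induction ws with
  | nil => intro r l; simp [pvCW, pvCCW]
  | cons t ws ih =>
    intro r l
    rw [List.foldl_cons]
    by_cases h1 : t = "NE"
    · subst h1; rw [show pvStep (r, l) "NE" = (r + 1, l) from rfl, ih]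
      simp [pvCW, pvCCW]; ring
    by_cases h2 : t = "ES"
    · subst h2; rw [show pvStep (r, l) "ES" = (r + 1, l) from rfl, ih]
      simp [pvCW, pvCCW]; ring
    by_cases h3 : t = "SW"
    · subst h3; rw [show pvStep (r, l) "SW" = (r + 1, l) from rfl, ih]
      simp [pvCW, pvCCW]; ring
    by_cases h4 : t = "WN"
    · subst h4; rw [show pvStep (r, l) "WN" = (r + 1, l) from rfl, ih]
      simp [pvCW, pvCCW]; ring
    by_cases h5 : t = "EN"
    · subst h5; rw [show pvStep (r, l) "EN" = (r, l + 1) from rfl, ih]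
      simp [pvCW, pvCCW]; ring
    by_cases h6 : t = "SE"
    · subst h6; rw [show pvStep (r, l) "SE" = (r, l + 1) from rfl, ih]
      simp [pvCW, pvCCW]; ring
    by_cases h7 : t = "WS"
    · subst h7; rw [show pvStep (r, l) "WS" = (r, l + 1) from rfl, ih]
      simp [pvCW, pvCCW]; ring
    by_cases h8 : t = "NW"
    · subst h8; rw [show pvStep (r, l) "NW" = (r, l + 1) from rfl, ih]
      simp [pvCW, pvCCW]; ring
    have hstep : pvStep (r, l) t = (r, l) := by
      unfold pvStep; rw [if_neg (by tauto), if_neg (by tauto)]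
    rw [hstep, ih]
    simp [pvCW, pvCCW, h1, h2, h3, h4, h5, h6, h7, h8]

lemma pv_main (line : String) : solve_line line = solve_line_alt line := by
  unfold solve_line solve_line_alt
  have hbody : (fun (rl : Int × Int) (i : Int) =>
      let temp := PySem.Str.slice line (some i) (some (i + 2))
      if temp = "NE" ∨ temp = "ES" ∨ temp = "SW" ∨ temp = "WN" then (rl.1 + 1, rl.2)
      else if temp = "EN" ∨ temp = "SE" ∨ temp = "WS" ∨ temp = "NW" then (rl.1, rl.2 + 1)
      else rl)
      = fun rl i => pvStep rl (PySem.Str.slice line (some i) (some (i + 2))) := rfl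
  rw [hbody, ← List.foldl_map, pv_fold_counts]
  simp only [PySem.List.count, List.map_cons, List.map_nil, List.sum_cons, List.sum_nil]
  set ws := (PySem.List.pyRange 0 (PySem.Str.len line - 1) 1).map
    (fun i => PySem.Str.slice line (some i) (some (i + 2))) with hws
  refine if_congr ?_ rfl rfl
  unfold pvCW pvCCW
  constructor <;> intro <;> omega

-- ===== VERDICT (by name: the statement is the Claim_ definition above) =====
theorem solve_line_spec : Claim_equal_solve_line := by
  intro line _
  unfold Spec_solve_line
  exact pv_main line
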